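-- pv_equiv track=rewrite | github.com/artur-hatch/AOIS | Lab_05/main.py | minimize_sdnf
-- ===== SOURCE A (Python) =====
-- def minterm_to_expr(minterm):
--     vars = ['Q2', 'Q1', 'Q0']
--     return ' & '.join([
--         f'{"" if bit == "1" else "!"}{var}'
--         for var, bit in zip(vars, minterm)
--         if bit != '-'
--     ])
--
-- def combine_terms(term1, term2):
--     diff = 0
--     combined = ''
--     for a, b in zip(term1, term2):
--         if a != b:
--             diff += 1
--             combined += '-'
--         else:
--             combined += a
--     return combined if diff == 1 else None
--
-- def minimize_sdnf(minterms):
--     groups = {}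
--     for m in minterms:
--         ones = m.count('1')
--         groups.setdefault(ones, []).append(m)
--
--     prime_implicants = set()
--     used = set()
--
--     for i in range(3):
--         for a in groups.get(i, []):
--             for b in groups.get(i+1, []):
--                 c = combine_terms(a, b)
--                 if c:
--                     used.update([a, b])
--                     prime_implicants.add(c)
--
--     for m in minterms:
--         if m not in used:
--             prime_implicants.add(m)
--
--     return [minterm_to_expr(p) for p in sorted(prime_implicants)]
-- ===== SOURCE B (Python) =====
-- def minterm_to_expr(minterm):
--     names = ['Q2', 'Q1', 'Q0']
--     return ' & '.join([
--         f'{"" if bit == "1" else "!"}{var}'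
--         for var, bit in zip(names, minterm)
--         if bit != '-'
--     ])
--
-- def minimize_sdnf(minterms):
--     prime_implicants = set()
--     used = set()
--     # direct scan over all pairs of minterms (no ones-count grouping index):
--     # combine when the ones-counts are i and i+1 for some i in 0..2 and
--     # exactly one zipped position differs
--     for a in minterms:
--         ones = a.count('1')
--         if ones < 3:
--             for b in minterms:
--                 if b.count('1') == ones + 1:
--                     pairs = list(zip(a, b))
--                     if sum(x != y for x, y in pairs) == 1:
--                         prime_implicants.add(''.join('-' if x != y else x for x, y in pairs))
--                         used.add(a)
--                         used.add(b)
--     for m in minterms: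
--         if m not in used:
--             prime_implicants.add(m)
--     return [minterm_to_expr(p) for p in sorted(prime_implicants)]
-- ===== Notes on version B (the rewrite author's own statement) =====
-- stated objective: alternative
-- what changed: B drops A's ones-count grouping dictionary entirely and instead scans all pairs of minterms directly, guarding each pair with an inline ones-count and single-position-difference test before adding the dashed combined term.
import Mathlib
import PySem

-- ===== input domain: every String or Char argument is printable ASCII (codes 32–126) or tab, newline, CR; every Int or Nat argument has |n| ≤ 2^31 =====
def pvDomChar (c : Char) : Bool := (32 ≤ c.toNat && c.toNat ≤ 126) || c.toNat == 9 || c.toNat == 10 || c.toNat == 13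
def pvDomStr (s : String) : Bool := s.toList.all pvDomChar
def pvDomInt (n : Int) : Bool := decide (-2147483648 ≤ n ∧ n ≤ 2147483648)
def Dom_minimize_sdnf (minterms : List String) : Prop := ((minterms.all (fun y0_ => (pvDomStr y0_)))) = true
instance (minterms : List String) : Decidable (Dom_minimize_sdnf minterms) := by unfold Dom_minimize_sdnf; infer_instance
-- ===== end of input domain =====

-- B replaces A's ones-count grouping dictionary by a direct scan over all pairs of
-- minterms with an inline one-bit-difference test (objective: alternative; B is shorter
-- but does more pair comparisons than A's group-pruned scan, so it is not faster).

-- ===== PORT A =====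
-- shared formatting helper (identical in both Pythons)
def minterm_to_expr (minterm : String) : String :=
  PySem.Str.join " & "
    (((["Q2", "Q1", "Q0"].zip minterm.toList).filter (fun p => p.2 != '-')).map
      (fun p => (if p.2 = '1' then "" else "!") ++ p.1))

def combine_terms (term1 term2 : String) : Option String :=
  let r := (term1.toList.zip term2.toList).foldl
    (fun (st : Int × List Char) p =>
      if p.1 ≠ p.2 then (st.1 + 1, st.2 ++ ['-']) else (st.1, st.2 ++ [p.1]))
    ((0 : Int), ([] : List Char))
  if r.1 = 1 then some (String.ofList r.2) else none

def minimize_sdnf (minterms : List String) : List String :=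
  let groups : PySem.Dict Int (List String) :=
    minterms.foldl
      (fun g m => g.modify ((PySem.Str.count m "1" : Int)) [] (fun l => l ++ [m]))
      PySem.Dict.empty
  -- state = (used, prime_implicants)
  let st : PySem.Set String × PySem.Set String :=
    (PySem.List.pyRange 0 3 1).foldl (fun st i =>
      (groups.getD i []).foldl (fun st a =>
        (groups.getD (i + 1) []).foldl (fun st b =>
          match combine_terms a b with
          | some c =>
              if c ≠ "" then (PySem.Set.update st.1 [a, b], PySem.Set.add st.2 c) else st
          | none => st) st) st) (PySem.Set.empty, PySem.Set.empty)
  let prime := minterms.foldl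
    (fun p m => if PySem.Set.contains st.1 m then p else PySem.Set.add p m) st.2
  (PySem.List.sorted prime (fun x => x)).map minterm_to_expr

-- ===== PORT B =====
def minimize_sdnf_alt (minterms : List String) : List String :=
  -- state = (prime_implicants, used); direct scan over all pairs, inline diff test
  let st : PySem.Set String × PySem.Set String :=
    minterms.foldl (fun st a =>
      let ones := (PySem.Str.count a "1" : Int)
      if ones < 3 then
        minterms.foldl (fun st b =>
          if (PySem.Str.count b "1" : Int) = ones + 1 then
            let pairs := a.toList.zip b.toList
            if (pairs.map (fun p => if p.1 ≠ p.2 then (1 : Int) else 0)).sum = 1 then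
              (PySem.Set.add st.1 (String.ofList (pairs.map (fun p => if p.1 ≠ p.2 then '-' else p.1))),
               PySem.Set.add (PySem.Set.add st.2 a) b)
            else st
          else st) st
      else st) (PySem.Set.empty, PySem.Set.empty)
  let prime := minterms.foldl
    (fun p m => if PySem.Set.contains st.2 m then p else PySem.Set.add p m) st.1
  (PySem.List.sorted prime (fun x => x)).map minterm_to_expr

-- ===== PRECONDITION & SPEC =====
def Spec_minimize_sdnf (minterms : List String) (out : List String) : Prop := out = minimize_sdnf_alt minterms
instance (minterms : List String) (out : List String) : Decidable (Spec_minimize_sdnf minterms out) := by unfold Spec_minimize_sdnf; infer_instance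

-- ===== CLAIM (what is proved, stated in full; the proofs are below) =====
def Claim_equal_minimize_sdnf : Prop := ∀ (minterms : List String), Dom_minimize_sdnf minterms → Spec_minimize_sdnf minterms (minimize_sdnf minterms)

-- ===== LEMMAS AND PROOFS =====

-- proof-side abbreviations
def pvOnes (m : String) : Int := (PySem.Str.count m "1" : Int)
def pvDiff (a b : String) : Nat := (a.toList.zip b.toList).countP (fun p => decide (p.1 ≠ p.2))
def pvComb (a b : String) : String :=
  String.ofList ((a.toList.zip b.toList).map (fun p => if p.1 ≠ p.2 then '-' else p.1))

-- the A-side big fold (definitionally the 'st' of minimize_sdnf)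
def pvStA (minterms : List String) : PySem.Set String × PySem.Set String :=
  (PySem.List.pyRange 0 3 1).foldl (fun st i =>
    ((minterms.foldl
      (fun g m => g.modify ((PySem.Str.count m "1" : Int)) [] (fun l => l ++ [m]))
      PySem.Dict.empty).getD i []).foldl (fun st a =>
      ((minterms.foldl
        (fun g m => g.modify ((PySem.Str.count m "1" : Int)) [] (fun l => l ++ [m]))
        PySem.Dict.empty).getD (i + 1) []).foldl (fun st b =>
        match combine_terms a b with
        | some c =>
            if c ≠ "" then (PySem.Set.update st.1 [a, b], PySem.Set.add st.2 c) else st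
        | none => st) st) st) (PySem.Set.empty, PySem.Set.empty)

-- the B-side big fold (definitionally the 'st' of minimize_sdnf_alt)
def pvStB (minterms : List String) : PySem.Set String × PySem.Set String :=
  minterms.foldl (fun st a =>
    if (PySem.Str.count a "1" : Int) < 3 then
      minterms.foldl (fun st b =>
        if (PySem.Str.count b "1" : Int) = (PySem.Str.count a "1" : Int) + 1 then
          if ((a.toList.zip b.toList).map (fun p => if p.1 ≠ p.2 then (1 : Int) else 0)).sum = 1 then
            (PySem.Set.add st.1 (String.ofList ((a.toList.zip b.toList).map (fun p => if p.1 ≠ p.2 then '-' else p.1))),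
             PySem.Set.add (PySem.Set.add st.2 a) b)
          else st
        else st) st
    else st) (PySem.Set.empty, PySem.Set.empty)

def pvOk (minterms : List String) (a b : String) : Prop :=
  a ∈ minterms ∧ b ∈ minterms ∧ pvOnes a < 3 ∧ pvOnes b = pvOnes a + 1 ∧ pvDiff a b = 1

theorem pv_foldl_mem_iff {α σ : Type} (P : σ → Prop) (C : α → Prop) (f : σ → α → σ)
    (L : List α) (st : σ) (h : ∀ st a, a ∈ L → (P (f st a) ↔ P st ∨ C a)) :
    P (L.foldl f st) ↔ P st ∨ ∃ a ∈ L, C a := by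
  induction L generalizing st with
  | nil => simp
  | cons x t ih =>
    simp only [List.foldl_cons]
    rw [ih _ (fun st a ha => h st a (List.mem_cons_of_mem _ ha)),
        h st x (List.mem_cons_self ..)]
    simp only [List.mem_cons]
    constructor
    · rintro ((hp | hc) | ⟨a, ha, hca⟩)
      · exact Or.inl hp
      · exact Or.inr ⟨x, Or.inl rfl, hc⟩
      · exact Or.inr ⟨a, Or.inr ha, hca⟩
    · rintro (hp | ⟨a, (rfl | ha), hca⟩)
      · exact Or.inl (Or.inl hp)
      · exact Or.inl (Or.inr hca)
      · exact Or.inr ⟨a, ha, hca⟩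

theorem pv_foldl_preserve {α σ : Type} (P : σ → Prop) (f : σ → α → σ) (L : List α) (st : σ)
    (h : ∀ st a, P st → P (f st a)) (h0 : P st) : P (L.foldl f st) := by
  induction L generalizing st with
  | nil => exact h0
  | cons x t ih => exact ih _ (h st x h0)

theorem pv_groups_getD (minterms : List String) (i : Int) :
    (minterms.foldl
      (fun g m => g.modify ((PySem.Str.count m "1" : Int)) [] (fun l => l ++ [m]))
      PySem.Dict.empty).getD i []
    = minterms.filter (fun m => pvOnes m == i) := by
  have h1 : minterms.foldl
      (fun g m => g.modify ((PySem.Str.count m "1" : Int)) [] (fun l => l ++ [m]))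
      PySem.Dict.empty
      = (minterms.map (fun m => ((PySem.Str.count m "1" : Int), m))).foldl
          (fun d p => d.modify p.1 [] (fun x => x ++ [p.2])) PySem.Dict.empty := by
    rw [List.foldl_map]
  rw [h1, PySem.Dict.getD_foldl_modify_append]
  simp [List.filter_map, Function.comp_def, pvOnes]

theorem pv_sum_eq_countP (l : List (Char × Char)) :
    (l.map (fun p => if p.1 ≠ p.2 then (1 : Int) else 0)).sum
      = (l.countP (fun p => decide (p.1 ≠ p.2)) : Int) := by
  induction l with
  | nil => simp
  | cons p t ih =>
    simp only [List.map_cons, List.sum_cons, List.countP_cons, ih]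
    by_cases h : p.1 = p.2
    · simp [h]
    · simp [h]
      omega

theorem pv_combine_eq (a b : String) :
    combine_terms a b = if pvDiff a b = 1 then some (pvComb a b) else none := by
  have hfold : ∀ l : List (Char × Char),
      l.foldl (fun (st : Int × List Char) p =>
          if p.1 ≠ p.2 then (st.1 + 1, st.2 ++ ['-']) else (st.1, st.2 ++ [p.1]))
        ((0 : Int), ([] : List Char))
      = ((l.countP (fun p => decide (p.1 ≠ p.2)) : Int),
         l.map (fun p => if p.1 ≠ p.2 then '-' else p.1)) := by
    intro l
    have hstep : (fun (st : Int × List Char) (p : Char × Char) =>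
          if p.1 ≠ p.2 then (st.1 + 1, st.2 ++ ['-']) else (st.1, st.2 ++ [p.1]))
        = (fun st p =>
            ((fun (n : Int) (p : Char × Char) => if p.1 ≠ p.2 then n + 1 else n) st.1 p,
             (fun (l : List Char) (p : Char × Char) => l ++ [if p.1 ≠ p.2 then '-' else p.1]) st.2 p)) := by
      funext st p
      by_cases h : p.1 = p.2 <;> simp [h]
    rw [hstep, PySem.List.foldl_prod_mk
          (f := fun (n : Int) (p : Char × Char) => if p.1 ≠ p.2 then n + 1 else n)
          (g := fun (l : List Char) (p : Char × Char) => l ++ [if p.1 ≠ p.2 then '-' else p.1]),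
        PySem.List.foldl_ite_add_one, PySem.List.foldl_append_singleton_eq_map]
    simp
  simp only [combine_terms, hfold]
  by_cases h : pvDiff a b = 1
  · rw [if_pos (show ((a.toList.zip b.toList).countP (fun p => decide (p.1 ≠ p.2)) : Int) = 1 by
        unfold pvDiff at h; exact_mod_cast h), if_pos h]
    rfl
  · rw [if_neg (fun hc => h (by unfold pvDiff; exact_mod_cast hc)), if_neg h]

theorem pv_comb_ne_empty (a b : String) (h : pvDiff a b = 1) : pvComb a b ≠ "" := by
  intro hc
  unfold pvDiff at h
  unfold pvComb at hc
  cases hz : a.toList.zip b.toList with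
  | nil => rw [hz] at h; simp at h
  | cons p t =>
    rw [hz] at hc
    have := congrArg String.toList hc
    simp at this

theorem pv_stepA_eq (a b : String) (st : PySem.Set String × PySem.Set String) :
    (match combine_terms a b with
     | some c =>
         if c ≠ "" then (PySem.Set.update st.1 [a, b], PySem.Set.add st.2 c) else st
     | none => st)
    = if pvDiff a b = 1
        then (PySem.Set.update st.1 [a, b], PySem.Set.add st.2 (pvComb a b)) else st := by
  rw [pv_combine_eq]
  by_cases h : pvDiff a b = 1
  · simp [h, pv_comb_ne_empty a b h]
  · simp [h]

theorem pv_ones_nonneg (a : String) : 0 ≤ pvOnes a := by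
  unfold pvOnes
  positivity

-- A, innermost fold, prime component
theorem pv_innerA_prime (x a : String) (L : List String)
    (st : PySem.Set String × PySem.Set String) :
    x ∈ (L.foldl (fun st b =>
        match combine_terms a b with
        | some c =>
            if c ≠ "" then (PySem.Set.update st.1 [a, b], PySem.Set.add st.2 c) else st
        | none => st) st).2
    ↔ x ∈ st.2 ∨ ∃ b ∈ L, pvDiff a b = 1 ∧ x = pvComb a b :=
  pv_foldl_mem_iff (fun (st : PySem.Set String × PySem.Set String) => x ∈ st.2) _ _ L st (by
    intro st b _
    rw [pv_stepA_eq]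
    by_cases h : pvDiff a b = 1 <;> simp [h, PySem.Set.mem_add])

-- A, innermost fold, used component
theorem pv_innerA_used (x a : String) (L : List String)
    (st : PySem.Set String × PySem.Set String) :
    x ∈ (L.foldl (fun st b =>
        match combine_terms a b with
        | some c =>
            if c ≠ "" then (PySem.Set.update st.1 [a, b], PySem.Set.add st.2 c) else st
        | none => st) st).1
    ↔ x ∈ st.1 ∨ ∃ b ∈ L, pvDiff a b = 1 ∧ (x = a ∨ x = b) :=
  pv_foldl_mem_iff (fun (st : PySem.Set String × PySem.Set String) => x ∈ st.1) _ _ L st (by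
    intro st b _
    rw [pv_stepA_eq]
    by_cases h : pvDiff a b = 1 <;> simp [h, or_assoc])

theorem pv_memA_prime (minterms : List String) (x : String) :
    x ∈ (pvStA minterms).2 ↔ ∃ a b, pvOk minterms a b ∧ x = pvComb a b := by
  unfold pvStA
  simp only [pv_groups_getD]
  refine Iff.trans (pv_foldl_mem_iff (fun (st : PySem.Set String × PySem.Set String) => x ∈ st.2)
      (fun i => ∃ a ∈ minterms.filter (fun m => pvOnes m == i),
        ∃ b ∈ minterms.filter (fun m => pvOnes m == i + 1),
          pvDiff a b = 1 ∧ x = pvComb a b) _ _ _ ?_) ?_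
  · intro st i _
    refine Iff.trans (pv_foldl_mem_iff (fun (st : PySem.Set String × PySem.Set String) => x ∈ st.2)
        (fun a => ∃ b ∈ minterms.filter (fun m => pvOnes m == i + 1),
          pvDiff a b = 1 ∧ x = pvComb a b) _ _ _ ?_) Iff.rfl
    intro st a _
    exact pv_innerA_prime x a _ st
  · have hrange : PySem.List.pyRange 0 3 1 = [0, 1, 2] := by decide
    rw [hrange]
    simp only [PySem.Set.empty, List.not_mem_nil, false_or, List.mem_filter, beq_iff_eq,
      List.mem_cons, pvOk]
    constructor
    · rintro ⟨i, hi, a, ⟨ha, hoa⟩, b, ⟨hb, hob⟩, hd, hx⟩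
      simp only [or_false] at hi
      refine ⟨a, b, ⟨ha, hb, ?_, ?_, hd⟩, hx⟩
      · rcases hi with h | h | h <;> omega
      · omega
    · rintro ⟨a, b, ⟨ha, hb, h3, hob, hd⟩, hx⟩
      have h0 := pv_ones_nonneg a
      refine ⟨pvOnes a, ?_, a, ⟨ha, rfl⟩, b, ⟨hb, hob⟩, hd, hx⟩
      simp only [or_false]
      omega

theorem pv_memA_used (minterms : List String) (x : String) :
    x ∈ (pvStA minterms).1 ↔ ∃ a b, pvOk minterms a b ∧ (x = a ∨ x = b) := by
  unfold pvStA
  simp only [pv_groups_getD]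
  refine Iff.trans (pv_foldl_mem_iff (fun (st : PySem.Set String × PySem.Set String) => x ∈ st.1)
      (fun i => ∃ a ∈ minterms.filter (fun m => pvOnes m == i),
        ∃ b ∈ minterms.filter (fun m => pvOnes m == i + 1),
          pvDiff a b = 1 ∧ (x = a ∨ x = b)) _ _ _ ?_) ?_
  · intro st i _
    refine Iff.trans (pv_foldl_mem_iff (fun (st : PySem.Set String × PySem.Set String) => x ∈ st.1)
        (fun a => ∃ b ∈ minterms.filter (fun m => pvOnes m == i + 1),
          pvDiff a b = 1 ∧ (x = a ∨ x = b)) _ _ _ ?_) Iff.rfl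
    intro st a _
    exact pv_innerA_used x a _ st
  · have hrange : PySem.List.pyRange 0 3 1 = [0, 1, 2] := by decide
    rw [hrange]
    simp only [PySem.Set.empty, List.not_mem_nil, false_or, List.mem_filter, beq_iff_eq,
      List.mem_cons, pvOk]
    constructor
    · rintro ⟨i, hi, a, ⟨ha, hoa⟩, b, ⟨hb, hob⟩, hd, hx⟩
      simp only [or_false] at hi
      refine ⟨a, b, ⟨ha, hb, ?_, ?_, hd⟩, hx⟩
      · rcases hi with h | h | h <;> omega
      · omega
    · rintro ⟨a, b, ⟨ha, hb, h3, hob, hd⟩, hx⟩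
      have h0 := pv_ones_nonneg a
      refine ⟨pvOnes a, ?_, a, ⟨ha, rfl⟩, b, ⟨hb, hob⟩, hd, hx⟩
      simp only [or_false]
      omega

-- B, inner fold, prime component
theorem pv_innerB_prime (x a : String) (L : List String)
    (st : PySem.Set String × PySem.Set String) :
    x ∈ (L.foldl (fun st b =>
        if (PySem.Str.count b "1" : Int) = (PySem.Str.count a "1" : Int) + 1 then
          if ((a.toList.zip b.toList).map (fun p => if p.1 ≠ p.2 then (1 : Int) else 0)).sum = 1 then
            (PySem.Set.add st.1 (String.ofList ((a.toList.zip b.toList).map (fun p => if p.1 ≠ p.2 then '-' else p.1))),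
             PySem.Set.add (PySem.Set.add st.2 a) b)
          else st
        else st) st).1
    ↔ x ∈ st.1 ∨ ∃ b ∈ L, pvOnes b = pvOnes a + 1 ∧ pvDiff a b = 1 ∧ x = pvComb a b :=
  pv_foldl_mem_iff (fun (st : PySem.Set String × PySem.Set String) => x ∈ st.1) _ _ L st (by
    intro st b _
    simp only [pv_sum_eq_countP]
    split_ifs with h1 h2
    · have h1' : pvOnes b = pvOnes a + 1 := h1
      have h2' : pvDiff a b = 1 := by unfold pvDiff; exact_mod_cast h2
      simp only [PySem.Set.mem_add, pvComb]
      tauto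
    · have h2' : ¬ pvDiff a b = 1 := fun hc => h2 (by unfold pvDiff at hc; exact_mod_cast hc)
      tauto
    · have h1' : ¬ pvOnes b = pvOnes a + 1 := h1
      tauto)

-- B, inner fold, used component
theorem pv_innerB_used (x a : String) (L : List String)
    (st : PySem.Set String × PySem.Set String) :
    x ∈ (L.foldl (fun st b =>
        if (PySem.Str.count b "1" : Int) = (PySem.Str.count a "1" : Int) + 1 then
          if ((a.toList.zip b.toList).map (fun p => if p.1 ≠ p.2 then (1 : Int) else 0)).sum = 1 then
            (PySem.Set.add st.1 (String.ofList ((a.toList.zip b.toList).map (fun p => if p.1 ≠ p.2 then '-' else p.1))),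
             PySem.Set.add (PySem.Set.add st.2 a) b)
          else st
        else st) st).2
    ↔ x ∈ st.2 ∨ ∃ b ∈ L, pvOnes b = pvOnes a + 1 ∧ pvDiff a b = 1 ∧ (x = a ∨ x = b) :=
  pv_foldl_mem_iff (fun (st : PySem.Set String × PySem.Set String) => x ∈ st.2) _ _ L st (by
    intro st b _
    simp only [pv_sum_eq_countP]
    split_ifs with h1 h2
    · have h1' : pvOnes b = pvOnes a + 1 := h1
      have h2' : pvDiff a b = 1 := by unfold pvDiff; exact_mod_cast h2
      simp only [PySem.Set.mem_add]
      tauto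
    · have h2' : ¬ pvDiff a b = 1 := fun hc => h2 (by unfold pvDiff at hc; exact_mod_cast hc)
      tauto
    · have h1' : ¬ pvOnes b = pvOnes a + 1 := h1
      tauto)

theorem pv_memB_prime (minterms : List String) (x : String) :
    x ∈ (pvStB minterms).1 ↔ ∃ a b, pvOk minterms a b ∧ x = pvComb a b := by
  unfold pvStB
  refine Iff.trans (pv_foldl_mem_iff (fun (st : PySem.Set String × PySem.Set String) => x ∈ st.1)
      (fun a => pvOnes a < 3 ∧ ∃ b ∈ minterms,
        pvOnes b = pvOnes a + 1 ∧ pvDiff a b = 1 ∧ x = pvComb a b) _ _ _ ?_) ?_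
  · intro st a _
    split_ifs with h
    · refine Iff.trans (pv_innerB_prime x a minterms st) ?_
      have h' : pvOnes a < 3 := h
      constructor
      · rintro (hp | hb)
        · exact Or.inl hp
        · exact Or.inr ⟨h', hb⟩
      · rintro (hp | hb)
        · exact Or.inl hp
        · exact Or.inr hb.2
    · have h' : ¬ pvOnes a < 3 := h
      constructor
      · exact fun hp => Or.inl hp
      · rintro (hp | hb)
        · exact hp
        · exact absurd hb.1 h' 
  · simp only [PySem.Set.empty, List.not_mem_nil, false_or, pvOk]
    constructor
    · rintro ⟨a, ha, h3, b, hb, hob, hd, hx⟩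
      exact ⟨a, b, ⟨ha, hb, h3, hob, hd⟩, hx⟩
    · rintro ⟨a, b, ⟨ha, hb, h3, hob, hd⟩, hx⟩
      exact ⟨a, ha, h3, b, hb, hob, hd, hx⟩

theorem pv_memB_used (minterms : List String) (x : String) :
    x ∈ (pvStB minterms).2 ↔ ∃ a b, pvOk minterms a b ∧ (x = a ∨ x = b) := by
  unfold pvStB
  refine Iff.trans (pv_foldl_mem_iff (fun (st : PySem.Set String × PySem.Set String) => x ∈ st.2)
      (fun a => pvOnes a < 3 ∧ ∃ b ∈ minterms,
        pvOnes b = pvOnes a + 1 ∧ pvDiff a b = 1 ∧ (x = a ∨ x = b)) _ _ _ ?_) ?_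
  · intro st a _
    split_ifs with h
    · refine Iff.trans (pv_innerB_used x a minterms st) ?_
      have h' : pvOnes a < 3 := h
      constructor
      · rintro (hp | hb)
        · exact Or.inl hp
        · exact Or.inr ⟨h', hb⟩
      · rintro (hp | hb)
        · exact Or.inl hp
        · exact Or.inr hb.2
    · have h' : ¬ pvOnes a < 3 := h
      constructor
      · exact fun hp => Or.inl hp
      · rintro (hp | hb)
        · exact hp
        · exact absurd hb.1 h' 
  · simp only [PySem.Set.empty, List.not_mem_nil, false_or, pvOk]
    constructor
    · rintro ⟨a, ha, h3, b, hb, hob, hd, hx⟩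
      exact ⟨a, b, ⟨ha, hb, h3, hob, hd⟩, hx⟩
    · rintro ⟨a, b, ⟨ha, hb, h3, hob, hd⟩, hx⟩
      exact ⟨a, ha, h3, b, hb, hob, hd, hx⟩

theorem pv_nodupA_prime (minterms : List String) : ((pvStA minterms).2 : List String).Nodup := by
  unfold pvStA
  refine pv_foldl_preserve (fun (st : PySem.Set String × PySem.Set String) => (st.2 : List String).Nodup) _ _ _ ?_ ?_
  · intro st i h
    refine pv_foldl_preserve (fun (st : PySem.Set String × PySem.Set String) => (st.2 : List String).Nodup) _ _ _ ?_ h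
    intro st a h'
    refine pv_foldl_preserve (fun (st : PySem.Set String × PySem.Set String) => (st.2 : List String).Nodup) _ _ _ ?_ h'
    intro st b h''
    rw [pv_stepA_eq]
    split
    · exact PySem.Set.nodup_add _ _ h''
    · exact h''
  · exact List.nodup_nil

theorem pv_nodupB_prime (minterms : List String) : ((pvStB minterms).1 : List String).Nodup := by
  unfold pvStB
  refine pv_foldl_preserve (fun (st : PySem.Set String × PySem.Set String) => (st.1 : List String).Nodup) _ _ _ ?_ ?_
  · intro st a h
    split
    · refine pv_foldl_preserve (fun (st : PySem.Set String × PySem.Set String) => (st.1 : List String).Nodup) _ _ _ ?_ h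
      intro st b h'
      split
      · split
        · exact PySem.Set.nodup_add _ _ h'
        · exact h'
      · exact h'
    · exact h
  · exact List.nodup_nil

theorem pv_final_mem (used prime : PySem.Set String) (minterms : List String) (x : String) :
    x ∈ minterms.foldl
      (fun p m => if PySem.Set.contains used m then p else PySem.Set.add p m) prime
    ↔ x ∈ prime ∨ ∃ m ∈ minterms, m ∉ used ∧ x = m := by
  refine pv_foldl_mem_iff (fun (p : PySem.Set String) => x ∈ p) _ _ minterms prime ?_
  intro st a _
  by_cases h : a ∈ used
  · simp [h]
  · simp [h, PySem.Set.mem_add]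

theorem pv_final_nodup (used prime : PySem.Set String) (minterms : List String)
    (h : (prime : List String).Nodup) :
    (minterms.foldl
      (fun p m => if PySem.Set.contains used m then p else PySem.Set.add p m) prime
      : List String).Nodup := by
  refine pv_foldl_preserve (fun (p : PySem.Set String) => (p : List String).Nodup) _ _ _ ?_ h
  intro st a ha
  split
  · exact ha
  · exact PySem.Set.nodup_add _ _ ha

theorem pv_main (minterms : List String) :
    minimize_sdnf minterms = minimize_sdnf_alt minterms := by
  have hA : minimize_sdnf minterms
      = (PySem.List.sorted (minterms.foldl
          (fun p m => if PySem.Set.contains (pvStA minterms).1 m then p else PySem.Set.add p m)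
          (pvStA minterms).2) (fun x => x)).map minterm_to_expr := rfl
  have hB : minimize_sdnf_alt minterms
      = (PySem.List.sorted (minterms.foldl
          (fun p m => if PySem.Set.contains (pvStB minterms).2 m then p else PySem.Set.add p m)
          (pvStB minterms).1) (fun x => x)).map minterm_to_expr := rfl
  rw [hA, hB]
  have ndA := pv_final_nodup (pvStA minterms).1 (pvStA minterms).2 minterms (pv_nodupA_prime minterms)
  have ndB := pv_final_nodup (pvStB minterms).2 (pvStB minterms).1 minterms (pv_nodupB_prime minterms)
  have hmem : ∀ y, y ∈ minterms.foldl
      (fun p m => if PySem.Set.contains (pvStA minterms).1 m then p else PySem.Set.add p m)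
      (pvStA minterms).2
    ↔ y ∈ minterms.foldl
      (fun p m => if PySem.Set.contains (pvStB minterms).2 m then p else PySem.Set.add p m)
      (pvStB minterms).1 := by
    intro y
    rw [pv_final_mem, pv_final_mem, pv_memA_prime, pv_memB_prime]
    simp only [pv_memA_used, pv_memB_used]
  have hperm := (List.perm_ext_iff_of_nodup ndA ndB).2 hmem
  have hsort : PySem.List.sorted (minterms.foldl
        (fun p m => if PySem.Set.contains (pvStA minterms).1 m then p else PySem.Set.add p m)
        (pvStA minterms).2) (fun x => x)
      = PySem.List.sorted (minterms.foldl
        (fun p m => if PySem.Set.contains (pvStB minterms).2 m then p else PySem.Set.add p m)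
        (pvStB minterms).1) (fun x => x) := by
    refine PySem.List.eq_of_perm_of_pairwise_le_of_injective (fun x => x)
      (fun u v h => h) ?_ ?_ ?_
    · exact ((PySem.List.sorted_perm _ _ _).trans hperm).trans (PySem.List.sorted_perm _ _ _).symm
    · exact PySem.List.sorted_pairwise _ _
    · exact PySem.List.sorted_pairwise _ _
  rw [hsort]

-- ===== VERDICT (by name: the statement is the Claim_ definition above) =====
theorem minimize_sdnf_spec : Claim_equal_minimize_sdnf := by
  intro minterms _
  unfold Spec_minimize_sdnf
  exact pv_main minterms
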